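-- pv_equiv track=rewrite | github.com/mathbeveridge/asm | sst_factor.py | factor_weakly_incr_row
-- ===== SOURCE A (Python) =====
-- def factor_weakly_incr_row(square):
--     size = len(square)
--
--     if size == 1:
--         return( [ square,])
--     else:
--         factor_square = [[0,] * size  for k in range(size)]
--         # reduce size of next square later
--         next_square = [row.copy() for row in square]
--         for i in range(size):
--             if 1 in square[i]:
--                 j = square[i].index(1)
--                 next_square[i][j] = 0
--                 for k in range(j,size):
--                     factor_square[i][k]=1
--
--         del next_square[-1]
--         for row in next_square:
--             del row[0]
--
--         return [ factor_square] + factor_weakly_incr_row(next_square)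
-- ===== SOURCE B (Python) =====
-- def _split_row(row, size):
--     if 1 in row:
--         j = row.index(1)
--         frow = [1 if k >= j else 0 for k in range(size)]
--         nrow = row[:j] + [0] + row[j + 1:]
--     else:
--         frow = [0] * size
--         nrow = row
--     return frow, nrow[1:]
--
--
-- def factor_weakly_incr_row(square):
--     result = []
--     while len(square) > 1:
--         size = len(square)
--         pairs = [_split_row(row, size) for row in square]
--         result.append([p[0] for p in pairs])
--         square = [p[1] for p in pairs][:-1]
--     result.append(square)
--     return result
-- ===== Notes on version B (the rewrite author's own statement) =====
-- stated objective: alternative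
-- what changed: Replaces A's recursion that preallocates zero matrices and mutates them index-by-index with an iterative while-loop carrying an accumulator list, building each factor row and shrunken next row functionally per row (comprehension and slices) via a _split_row helper.
import Mathlib
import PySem

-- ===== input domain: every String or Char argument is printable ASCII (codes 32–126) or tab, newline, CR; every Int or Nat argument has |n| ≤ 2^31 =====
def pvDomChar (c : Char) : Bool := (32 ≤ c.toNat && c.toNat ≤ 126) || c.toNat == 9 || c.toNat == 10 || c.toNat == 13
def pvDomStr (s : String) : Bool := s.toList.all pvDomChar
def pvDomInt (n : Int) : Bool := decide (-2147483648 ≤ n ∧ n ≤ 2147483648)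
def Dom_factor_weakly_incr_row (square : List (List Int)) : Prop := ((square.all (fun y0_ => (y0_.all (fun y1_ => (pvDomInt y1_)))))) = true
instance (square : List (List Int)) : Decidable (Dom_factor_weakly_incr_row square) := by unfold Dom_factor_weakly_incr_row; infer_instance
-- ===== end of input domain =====

-- B replaces A's recursion over mutated preallocated matrices by an iterative accumulator loop
-- building each factor row and next row functionally per row; objective: alternative decomposition, same cost.

-- ===== PORT A =====
-- body of A's 'for i in range(size)' loop; st = (factor_square, next_square);
-- 'next_square[i][j] = 0' and 'for k in range(j,size): factor_square[i][k] = 1' as in-range List.set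
-- ((List.range size).drop j is range(j, size) here since 0 ≤ j; '1 in row' is contains, row.index(1) is PySem.List.index?)
def pvStepA (square : List (List Int)) (size : Nat)
    (st : List (List Int) × List (List Int)) (i : Nat) :
    List (List Int) × List (List Int) :=
  let row := square.getD i []
  if row.contains 1 then
    let j := (PySem.List.index? row 1).getD 0
    (st.1.set i (((List.range size).drop j).foldl (fun r k => r.set k 1) (st.1.getD i [])),
     st.2.set i ((st.2.getD i []).set j 0))
  else st

-- length of next_square is preserved by the loop (used only for termination of the port)
theorem pvStepA_foldl_len (sq : List (List Int)) (n : Nat) (xs : List Nat)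
    (st : List (List Int) × List (List Int)) :
    ((xs.foldl (pvStepA sq n) st).2).length = st.2.length := by
  induction xs generalizing st with
  | nil => rfl
  | cons x xs ih =>
    rw [List.foldl_cons, ih]
    simp only [pvStepA]
    split
    · rw [List.length_set]
    · rfl

def factor_weakly_incr_row (square : List (List Int)) : List (List (List Int)) :=
  if square.length = 1 then [square]
  else if square.length = 0 then []
    -- Python A raises IndexError here ('del next_square[-1]' on an empty list); excluded by Pre_
  else
    let size := square.length
    let st := (List.range size).foldl (pvStepA square size)
      (List.replicate size (List.replicate size (0 : Int)), square)
    -- 'del next_square[-1]' is dropLast, 'del row[0]' is drop 1 (rows are nonempty under Pre_; Python raises otherwise)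
    let next1 := st.2.dropLast.map (fun row => row.drop 1)
    st.1 :: factor_weakly_incr_row next1
termination_by square.length
decreasing_by
  have h := pvStepA_foldl_len square square.length (List.range square.length)
    (List.replicate square.length (List.replicate square.length (0 : Int)), square)
  simp [h]
  omega

-- ===== PORT B =====
-- _split_row: slices row[:j], row[j+1:], nrow[1:] are take/drop (indices non-negative, exact)
def pvSplitRow (row : List Int) (size : Nat) : List Int × List Int :=
  if row.contains 1 then
    let j := (PySem.List.index? row 1).getD 0
    ((List.range size).map (fun k => if j ≤ k then (1 : Int) else 0),
     (row.take j ++ [0] ++ row.drop (j + 1)).drop 1)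
  else (List.replicate size (0 : Int), row.drop 1)

-- the while-loop with its accumulator 'result'; square[:-1]-style '[p[1] for p in pairs][:-1]' is dropLast
def pvLoopB (square : List (List Int)) (result : List (List (List Int))) : List (List (List Int)) :=
  if square.length > 1 then
    let size := square.length
    let pairs := square.map (fun row => pvSplitRow row size)
    pvLoopB ((pairs.map Prod.snd).dropLast) (result ++ [pairs.map Prod.fst])
  else result ++ [square]
termination_by square.length
decreasing_by simp; omega

def factor_weakly_incr_row_alt (square : List (List Int)) : List (List (List Int)) :=
  pvLoopB square []

-- ===== PRECONDITION & SPEC =====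
-- Pre_ excludes exactly the inputs on which Python A raises IndexError: the empty square
-- ('del next_square[-1]') and squares whose i-th row is too short to survive its len(square)-1-i
-- leading deletions ('del row[0]' on an empty row).
def Pre_factor_weakly_incr_row (square : List (List Int)) : Prop :=
  square ≠ [] ∧ ∀ i < square.length, square.length ≤ (square.getD i []).length + i + 1
instance (square : List (List Int)) : Decidable (Pre_factor_weakly_incr_row square) := by
  unfold Pre_factor_weakly_incr_row; infer_instance

def pvWitness_factor_weakly_incr_row : List (List Int) := [[0, 1], [1, 2]]

def Spec_factor_weakly_incr_row (square : List (List Int)) (out : List (List (List Int))) : Prop := out = factor_weakly_incr_row_alt square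
instance (square : List (List Int)) (out : List (List (List Int))) : Decidable (Spec_factor_weakly_incr_row square out) := by unfold Spec_factor_weakly_incr_row; infer_instance

-- ===== CLAIM (what is proved, stated in full; the proofs are below) =====
def Claim_equal_factor_weakly_incr_row : Prop := ∀ (square : List (List Int)), Dom_factor_weakly_incr_row square → Pre_factor_weakly_incr_row square → Spec_factor_weakly_incr_row square (factor_weakly_incr_row square)

-- ===== LEMMAS AND PROOFS =====

-- the factor row A builds at index i, and the next row, as functions of the current state rows
def pvF (sq : List (List Int)) (n i : Nat) (r : List Int) : List Int :=
  let row := sq.getD i []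
  if row.contains 1 then
    ((List.range n).drop ((PySem.List.index? row 1).getD 0)).foldl (fun r k => r.set k 1) r
  else r

def pvN2 (row : List Int) : List Int :=
  if row.contains 1 then row.set ((PySem.List.index? row 1).getD 0) 0 else row

def pvN (sq : List (List Int)) (i : Nat) (r : List Int) : List Int :=
  let row := sq.getD i []
  if row.contains 1 then r.set ((PySem.List.index? row 1).getD 0) 0 else r

theorem pvSetfold_len (xs : List Nat) (r : List Int) :
    (xs.foldl (fun r i => r.set i 1) r).length = r.length := by
  induction xs generalizing r with
  | nil => rfl
  | cons x xs ih => rw [List.foldl_cons, ih]; rw [List.length_set]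

theorem pvSetfold_nil (xs : List Nat) :
    xs.foldl (fun (r : List Int) i => r.set i 1) [] = [] := by
  induction xs with
  | nil => rfl
  | cons x xs ih => simpa using ih

theorem pvF_nil (sq : List (List Int)) (n i : Nat) : pvF sq n i [] = [] := by
  simp only [pvF]; split
  · exact pvSetfold_nil _
  · rfl

theorem pvN_nil (sq : List (List Int)) (i : Nat) : pvN sq i [] = [] := by
  simp only [pvN]; split
  · rfl
  · rfl

theorem pvGetD_set (l : List Int) (i j : Nat) (a : Int) :
    (l.set i a).getD j 0 = if i = j ∧ i < l.length then a else l.getD j 0 := by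
  simp only [List.getD, List.getElem?_set]
  split_ifs with h1 <;> rename_i h2 <;> simp_all <;> omega

theorem pvGetD_setL (l : List (List Int)) (i j : Nat) (a : List Int) :
    (l.set i a).getD j [] = if i = j ∧ i < l.length then a else l.getD j [] := by
  simp only [List.getD, List.getElem?_set]
  split_ifs with h1 <;> rename_i h2 <;> simp_all <;> omega

theorem pvSetfold_getD (xs : List Nat) (r : List Int) (k : Nat) :
    (xs.foldl (fun r i => r.set i 1) r).getD k 0
      = if k ∈ xs ∧ k < r.length then 1 else r.getD k 0 := by
  induction xs generalizing r with
  | nil => simp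
  | cons x xs ih =>
    rw [List.foldl_cons, ih]
    simp only [List.length_set, List.mem_cons, pvGetD_set]
    split_ifs <;> simp_all <;> omega

theorem pvFrow_closed (n j : Nat) :
    ((List.range n).drop j).foldl (fun (r : List Int) k => r.set k 1) (List.replicate n (0 : Int))
      = (List.range n).map (fun k => if j ≤ k then (1 : Int) else 0) := by
  have hdrop : (List.range n).drop j = List.range' j (n - j) := by
    rw [List.range_eq_range', List.drop_range']; simp
  apply List.ext_getElem
  · simp [pvSetfold_len]
  · intro k h1 h2
    have hk : k < n := by simpa using h2
    simp only [hdrop] at h1 ⊢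
    have := pvSetfold_getD (List.range' j (n - j)) (List.replicate n (0 : Int)) k
    rw [List.getD_eq_getElem?_getD, List.getElem?_eq_getElem h1, Option.getD_some] at this
    rw [this]
    simp only [List.mem_range'_1, List.length_replicate, List.getElem_map, List.getElem_range]
    have hrep : (List.replicate n (0 : Int)).getD k 0 = 0 := by simp [List.getD]
    split_ifs <;> simp_all <;> omega

-- the main loop invariant: A's index loop maps index i to pvF / pvN of the untouched entry
theorem pvFoldA_spec (sq : List (List Int)) (n : Nat) (m : Nat) :
    ∀ (k : Nat) (fs ns : List (List Int)),
      ((List.range' k m).foldl (pvStepA sq n) (fs, ns)).1.length = fs.length ∧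
      ((List.range' k m).foldl (pvStepA sq n) (fs, ns)).2.length = ns.length ∧
      (∀ i, ((List.range' k m).foldl (pvStepA sq n) (fs, ns)).1.getD i []
          = if k ≤ i ∧ i < k + m then pvF sq n i (fs.getD i []) else fs.getD i []) ∧
      (∀ i, ((List.range' k m).foldl (pvStepA sq n) (fs, ns)).2.getD i []
          = if k ≤ i ∧ i < k + m then pvN sq i (ns.getD i []) else ns.getD i []) := by
  induction m with
  | zero =>
    intro k fs ns
    simp
  | succ m ih =>
    intro k fs ns
    rw [List.range'_succ, List.foldl_cons]
    by_cases hc : (sq.getD k []).contains 1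
    · have hm : (1 : Int) ∈ sq[k]?.getD [] := by simpa using hc
      have hstep : pvStepA sq n (fs, ns) k =
          (fs.set k (pvF sq n k (fs.getD k [])), ns.set k (pvN sq k (ns.getD k []))) := by
        simp [pvStepA, pvF, pvN, hm]
      rw [hstep]
      obtain ⟨L1, L2, G1, G2⟩ :=
        ih (k + 1) (fs.set k (pvF sq n k (fs.getD k []))) (ns.set k (pvN sq k (ns.getD k [])))
      refine ⟨by simpa using L1, by simpa using L2, ?_, ?_⟩
      · intro i
        rw [G1 i]
        by_cases hik : i = k
        · subst hik
          rw [if_neg (by omega), if_pos (by omega : i ≤ i ∧ i < i + (m + 1)), pvGetD_setL]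
          by_cases hlen : i < fs.length
          · rw [if_pos ⟨rfl, hlen⟩]
          · rw [if_neg (by tauto), List.getD_eq_default _ _ (by omega), pvF_nil]
        · rw [pvGetD_setL, if_neg (by tauto : ¬(k = i ∧ k < fs.length))]
          split_ifs <;> first | rfl | omega
      · intro i
        rw [G2 i]
        by_cases hik : i = k
        · subst hik
          rw [if_neg (by omega), if_pos (by omega : i ≤ i ∧ i < i + (m + 1)), pvGetD_setL]
          by_cases hlen : i < ns.length
          · rw [if_pos ⟨rfl, hlen⟩]
          · rw [if_neg (by tauto), List.getD_eq_default _ _ (by omega), pvN_nil]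
        · rw [pvGetD_setL, if_neg (by tauto : ¬(k = i ∧ k < ns.length))]
          split_ifs <;> first | rfl | omega
    · have hm : (1 : Int) ∉ sq[k]?.getD [] := by simpa using hc
      have hstep : pvStepA sq n (fs, ns) k = (fs, ns) := by
        simp [pvStepA, hm]
      rw [hstep]
      obtain ⟨L1, L2, G1, G2⟩ := ih (k + 1) fs ns
      refine ⟨L1, L2, ?_, ?_⟩
      · intro i
        rw [G1 i]
        by_cases hik : i = k
        · subst hik
          rw [if_neg (by omega), if_pos (by omega : i ≤ i ∧ i < i + (m + 1))]
          simp [pvF, hm]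
        · split_ifs <;> first | rfl | omega
      · intro i
        rw [G2 i]
        by_cases hik : i = k
        · subst hik
          rw [if_neg (by omega), if_pos (by omega : i ≤ i ∧ i < i + (m + 1))]
          simp [pvN, hm]
        · split_ifs <;> first | rfl | omega

theorem pvFoldA_closed (sq : List (List Int)) :
    (List.range sq.length).foldl (pvStepA sq sq.length)
        (List.replicate sq.length (List.replicate sq.length (0 : Int)), sq)
      = (sq.map (fun row => (pvSplitRow row sq.length).1),
         sq.map (fun row => pvN2 row)) := by
  have hr : List.range sq.length = List.range' 0 sq.length := List.range_eq_range'
  rw [hr]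
  obtain ⟨L1, L2, G1, G2⟩ := pvFoldA_spec sq sq.length sq.length 0
    (List.replicate sq.length (List.replicate sq.length (0 : Int))) sq
  refine Prod.ext ?_ ?_
  · apply List.ext_getElem
    · simpa using L1
    · intro i h1 h2
      have hi : i < sq.length := by simpa using h2
      rw [← List.getD_eq_getElem _ [] h1, G1 i, if_pos (by omega)]
      have hrep : (List.replicate sq.length (List.replicate sq.length (0 : Int))).getD i []
          = List.replicate sq.length (0 : Int) := by simp [List.getD, hi]
      rw [hrep]
      have hget : sq.getD i [] = sq[i] := List.getD_eq_getElem _ [] hi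
      simp only [List.getElem_map]
      simp only [pvF, pvSplitRow, hget]
      split_ifs with hc
      · exact pvFrow_closed sq.length ((PySem.List.index? sq[i] 1).getD 0)
      · rfl
  · apply List.ext_getElem
    · simpa using L2
    · intro i h1 h2
      have hi : i < sq.length := by simpa using h2
      rw [← List.getD_eq_getElem _ [] h1, G2 i, if_pos (by omega)]
      have hget : sq.getD i [] = sq[i] := List.getD_eq_getElem _ [] hi
      simp only [List.getElem_map, pvN, pvN2, hget]

-- (pvSplitRow row n).2 agrees with A's next row followed by 'del row[0]'
theorem pvSplit_snd (row : List Int) (n : Nat) :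
    (pvSplitRow row n).2 = (pvN2 row).drop 1 := by
  simp only [pvSplitRow, pvN2]
  split_ifs with hc
  · rcases hidx : PySem.List.index? row 1 with _ | j
    · rw [PySem.List.index?_eq_none_iff] at hidx
      simp [List.contains_eq_mem, hidx] at hc
    · obtain ⟨hj, -, -⟩ := PySem.List.getElem_of_index?_eq_some hidx
      simp only [Option.getD_some]
      rw [List.set_eq_take_cons_drop _ hj]
      simp
  · rfl

theorem pvLoopB_acc (sq : List (List Int)) (res : List (List (List Int))) :
    pvLoopB sq res = res ++ pvLoopB sq [] := by
  by_cases hl : sq.length > 1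
  · conv_lhs => rw [pvLoopB]
    conv_rhs => rw [pvLoopB]
    rw [if_pos hl, if_pos hl]
    show pvLoopB ((sq.map (fun row => pvSplitRow row sq.length)).map Prod.snd).dropLast
          (res ++ [(sq.map (fun row => pvSplitRow row sq.length)).map Prod.fst])
        = res ++ pvLoopB ((sq.map (fun row => pvSplitRow row sq.length)).map Prod.snd).dropLast
          ([] ++ [(sq.map (fun row => pvSplitRow row sq.length)).map Prod.fst])
    rw [pvLoopB_acc _ (res ++ _), pvLoopB_acc _ ([] ++ _)]
    simp
  · conv_lhs => rw [pvLoopB]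
    conv_rhs => rw [pvLoopB]
    rw [if_neg hl, if_neg hl]
    simp
termination_by sq.length
decreasing_by all_goals simp; omega

theorem pvAB (sq : List (List Int)) (h : sq ≠ []) :
    factor_weakly_incr_row sq = pvLoopB sq [] := by
  by_cases h1 : sq.length = 1
  · rw [factor_weakly_incr_row, if_pos h1]
    conv_rhs => rw [pvLoopB]
    rw [if_neg (by omega)]
    simp
  · have h2 : sq.length ≠ 0 := by simpa using h
    have hlen : 1 < sq.length := by omega
    have hA : factor_weakly_incr_row sq
        = ((List.range sq.length).foldl (pvStepA sq sq.length)
            (List.replicate sq.length (List.replicate sq.length (0 : Int)), sq)).1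
          :: factor_weakly_incr_row
            (((List.range sq.length).foldl (pvStepA sq sq.length)
              (List.replicate sq.length (List.replicate sq.length (0 : Int)), sq)).2.dropLast.map
              (fun row => row.drop 1)) := by
      rw [factor_weakly_incr_row]
      rw [if_neg h1, if_neg h2]
    rw [hA, pvFoldA_closed]
    have hB : pvLoopB sq []
        = (sq.map (fun row => (pvSplitRow row sq.length).1))
          :: pvLoopB (((sq.map (fun row => pvSplitRow row sq.length)).map Prod.snd).dropLast) [] := by
      conv_lhs => rw [pvLoopB]
      rw [if_pos hlen]
      show pvLoopB ((sq.map (fun row => pvSplitRow row sq.length)).map Prod.snd).dropLast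
            ([] ++ [(sq.map (fun row => pvSplitRow row sq.length)).map Prod.fst])
          = (sq.map (fun row => (pvSplitRow row sq.length).1))
            :: pvLoopB ((sq.map (fun row => pvSplitRow row sq.length)).map Prod.snd).dropLast []
      rw [pvLoopB_acc]
      simp [List.map_map]
    rw [hB]
    have hnext : (sq.map (fun row => pvN2 row)).dropLast.map (fun row => row.drop 1)
        = ((sq.map (fun row => pvSplitRow row sq.length)).map Prod.snd).dropLast := by
      rw [List.map_map, ← List.map_dropLast, ← List.map_dropLast, List.map_map]
      apply List.map_congr_left
      intro row _
      simp [Function.comp, pvSplit_snd]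
    rw [hnext]
    congr 1
    apply pvAB
    have : (((sq.map (fun row => pvSplitRow row sq.length)).map Prod.snd).dropLast).length
        = sq.length - 1 := by simp
    intro hcon
    rw [hcon] at this
    simp at this
    omega
termination_by sq.length
decreasing_by simp; omega

-- ===== VERDICT (by name: the statement is the Claim_ definition above) =====
theorem factor_weakly_incr_row_spec : Claim_equal_factor_weakly_incr_row := by
  intro sq _ hpre
  unfold Spec_factor_weakly_incr_row factor_weakly_incr_row_alt
  exact pvAB sq hpre.1
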